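-- pv_equiv track=rewrite | github.com/MrBrantCode/unitest_baseline | mut_generate/mist_train_cf/cf_69714/solution.py | smallest_change_in_subset
-- ===== SOURCE A (Python) =====
-- from collections import Counter
--
-- def smallest_change_in_subset(arr, limit, subset):
--     freq = Counter(arr)
--     subs = set(subset)
--     changes = 0
--     l = 0
--     r = len(arr) - 1
--     while l <= r:
--         while (l < len(arr) and arr[l] in subset):
--             l += 1
--         while (r > 0 and arr[r] in subset):
--             r -= 1
--         if (l <= r):
--             changes += 1
--             freq[arr[l]] -= 1
--             freq[arr[r]] -= 1
--             if freq[arr[l]] == 0: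
--                 subs.remove(arr[l])
--             if freq[arr[r]] == 0 and arr[r] in subs:
--                 subs.remove(arr[r])
--             l += 1
--             r -= 1
--             if changes > limit:
--                 return min(changes, limit)
--     return min(changes, limit)
-- ===== SOURCE B (Python) =====
-- def smallest_change_in_subset(arr, limit, subset):
--     m = sum(1 for x in arr if x not in subset)
--     return min((m + 1) // 2, limit)
-- ===== Notes on version B (the rewrite author's own statement) =====
-- stated objective: simpler
-- what changed: Replaces the two-pointer scan with its dead Counter/set bookkeeping by a one-pass count m of elements not in subset and the closed form min((m+1)//2, limit); Pre_ excludes exactly the inputs on which A raises KeyError.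
import Mathlib
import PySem

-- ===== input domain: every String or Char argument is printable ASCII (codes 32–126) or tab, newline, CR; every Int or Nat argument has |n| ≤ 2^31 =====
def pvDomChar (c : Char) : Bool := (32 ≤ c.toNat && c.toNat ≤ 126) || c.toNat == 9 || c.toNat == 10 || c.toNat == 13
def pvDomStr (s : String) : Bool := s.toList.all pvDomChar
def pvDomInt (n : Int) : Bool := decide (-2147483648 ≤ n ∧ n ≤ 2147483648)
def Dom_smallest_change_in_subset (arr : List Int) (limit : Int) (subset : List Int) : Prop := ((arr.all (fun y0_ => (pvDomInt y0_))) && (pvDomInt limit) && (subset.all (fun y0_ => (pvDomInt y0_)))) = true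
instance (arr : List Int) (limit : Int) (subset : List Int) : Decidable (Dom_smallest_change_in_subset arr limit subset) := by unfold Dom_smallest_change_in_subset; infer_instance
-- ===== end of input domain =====

-- B replaces A's two-pointer scan (whose Counter/set bookkeeping never affects the returned
-- value, only raises) by a one-pass count and the closed form min((m+1)//2, limit): simpler.

-- ===== PORT A =====

-- inner loop 'while (l < len(arr) and arr[l] in subset): l += 1'
def pvSkipL (arr subset : List Int) (l : Int) : Int :=
  if h : l < (arr.length : Int) ∧ PySem.List.pyGetD arr l 0 ∈ subset then
    pvSkipL arr subset (l + 1)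
  else l
termination_by ((arr.length : Int) - l).toNat
decreasing_by omega

-- inner loop 'while (r > 0 and arr[r] in subset): r -= 1'
def pvSkipR (arr subset : List Int) (r : Int) : Int :=
  if h : 0 < r ∧ PySem.List.pyGetD arr r 0 ∈ subset then
    pvSkipR arr subset (r - 1)
  else r
termination_by r.toNat
decreasing_by omega

-- termination facts for the outer while loop (cited by name in decreasing_by)
theorem pvSkipL_ge (arr subset : List Int) (l : Int) : l ≤ pvSkipL arr subset l := by
  unfold pvSkipL
  split
  · have := pvSkipL_ge arr subset (l + 1); omega
  · exact le_refl l
termination_by ((arr.length : Int) - l).toNat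
decreasing_by omega

theorem pvSkipR_le (arr subset : List Int) (r : Int) : pvSkipR arr subset r ≤ r := by
  unfold pvSkipR
  split
  · have := pvSkipR_le arr subset (r - 1); omega
  · exact le_refl r
termination_by r.toNat
decreasing_by omega

-- outer 'while l <= r' loop; 'none' = the KeyError raised by 'subs.remove(arr[l])'
def pvLoopA (arr : List Int) (limit : Int) (subset : List Int)
    (freq : PySem.Dict Int Int) (subs : PySem.Set Int) (changes l r : Int) : Option Int :=
  if _hlr : l ≤ r then
    let l' := pvSkipL arr subset l
    let r' := pvSkipR arr subset r
    if _hp : l' ≤ r' then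
      let changes' := changes + 1
      let al := PySem.List.pyGetD arr l' 0
      let ar := PySem.List.pyGetD arr r' 0
      let freq' := (freq.modify al 0 (· - 1)).modify ar 0 (· - 1)
      -- 'if freq[arr[l]] == 0: subs.remove(arr[l])'  (remove? = none is Python's KeyError)
      match (if freq'.getD al 0 = 0 then PySem.Set.remove? subs al else some subs) with
      | none => none
      | some subs1 =>
        -- 'if freq[arr[r]] == 0 and arr[r] in subs: subs.remove(arr[r])' (cannot raise: guarded)
        let subs2 := if freq'.getD ar 0 = 0 ∧ PySem.Set.contains subs1 ar then
            PySem.Set.discard subs1 ar else subs1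
        if changes' > limit then some (min changes' limit)
        else pvLoopA arr limit subset freq' subs2 changes' (l' + 1) (r' - 1)
    else some (min changes limit)
  else some (min changes limit)
termination_by (r - l + 1).toNat
decreasing_by
  have h1 := pvSkipL_ge arr subset l
  have h2 := pvSkipR_le arr subset r
  omega

def smallest_change_in_subset (arr : List Int) (limit : Int) (subset : List Int) : Int :=
  (pvLoopA arr limit subset (PySem.Dict.counter arr) (PySem.Set.ofList subset)
      0 0 ((arr.length : Int) - 1)).getD 0

-- ===== PORT B =====
def smallest_change_in_subset_alt (arr : List Int) (limit : Int) (subset : List Int) : Int :=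
  let m : Int := arr.foldl (fun acc x => if x ∉ subset then acc + 1 else acc) 0
  min (PySem.Int.floordiv (m + 1) 2) limit

-- ===== PRECONDITION & SPEC =====

-- 'ws[j] occurs again strictly inside the remaining window' for every pairing step j the loop
-- executes; this is exactly the condition under which A's 'subs.remove(arr[l])' never raises.
def pvNE (ws : List Int) (s : Nat) : Prop :=
  ∀ j : Nat, j < min ((ws.length + 1) / 2) s → 2 * j + 1 < ws.length →
    ws.getD j 0 ∈ (ws.drop (j + 1)).take (ws.length - 2 * j - 2)

-- Pre_ excludes exactly the inputs on which A raises KeyError in 'subs.remove(arr[l])'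
-- (a value never inserted into subs); on every input where A returns, Pre_ holds.
def Pre_smallest_change_in_subset (arr : List Int) (limit : Int) (subset : List Int) : Prop :=
  pvNE (arr.filter (fun x => decide (x ∉ subset))) (limit.toNat + 1)

instance (arr : List Int) (limit : Int) (subset : List Int) :
    Decidable (Pre_smallest_change_in_subset arr limit subset) := by
  unfold Pre_smallest_change_in_subset pvNE; infer_instance

def pvWitness_smallest_change_in_subset : List Int × Int × List Int := ([1, 1, 1], 5, [])

def Spec_smallest_change_in_subset (arr : List Int) (limit : Int) (subset : List Int) (out : Int) : Prop := out = smallest_change_in_subset_alt arr limit subset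
instance (arr : List Int) (limit : Int) (subset : List Int) (out : Int) : Decidable (Spec_smallest_change_in_subset arr limit subset out) := by unfold Spec_smallest_change_in_subset; infer_instance

-- ===== CLAIM (what is proved, stated in full; the proofs are below) =====
def Claim_equal_smallest_change_in_subset : Prop := ∀ (arr : List Int) (limit : Int) (subset : List Int), Dom_smallest_change_in_subset arr limit subset → Pre_smallest_change_in_subset arr limit subset → Spec_smallest_change_in_subset arr limit subset (smallest_change_in_subset arr limit subset)

-- ===== LEMMAS AND PROOFS =====

-- the window arr[l..r] and its non-subset elements
def pvW (arr : List Int) (l r : Int) : List Int :=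
  (arr.drop l.toNat).take (r + 1 - l).toNat

def pvF (arr subset : List Int) (l r : Int) : List Int :=
  (pvW arr l r).filter (fun x => decide (x ∉ subset))

theorem pvW_nil (arr : List Int) (l r : Int) (h : r < l) : pvW arr l r = [] := by
  unfold pvW
  have : (r + 1 - l).toNat = 0 := by omega
  simp [this]

theorem pvW_cons (arr : List Int) (l r : Int) (hl : 0 ≤ l) (hr : l ≤ r)
    (hlen : l < (arr.length : Int)) :
    pvW arr l r = arr[l.toNat]'(by omega) :: pvW arr (l + 1) r := by
  unfold pvW
  rw [List.drop_eq_getElem_cons (by omega)]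
  have h1 : (r + 1 - l).toNat = (r + 1 - (l + 1)).toNat + 1 := by omega
  have h2 : (l + 1).toNat = l.toNat + 1 := by omega
  rw [h1, h2, List.take_succ_cons]

theorem pvW_snoc (arr : List Int) (l r : Int) (hl : 0 ≤ l) (hr : l ≤ r)
    (hlen : r < (arr.length : Int)) :
    pvW arr l r = pvW arr l (r - 1) ++ [arr[r.toNat]'(by omega)] := by
  unfold pvW
  have h1 : (r + 1 - l).toNat = (r - 1 + 1 - l).toNat + 1 := by omega
  rw [h1, List.take_add_one, List.getElem?_drop]
  have h2 : l.toNat + (r - 1 + 1 - l).toNat = r.toNat := by omega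
  rw [h2, List.getElem?_eq_getElem (by omega)]
  simp

theorem pvSkipL_F (arr subset : List Int) (l r : Int) (hl : 0 ≤ l) :
    pvF arr subset (pvSkipL arr subset l) r = pvF arr subset l r := by
  unfold pvSkipL
  split
  · next h =>
    have hmem := h.2
    rw [PySem.List.pyGetD_eq_getElem arr 0 hl h.1] at hmem
    rw [pvSkipL_F arr subset (l + 1) r (by omega)]
    unfold pvF
    by_cases hlr : l ≤ r
    · rw [pvW_cons arr l r hl hlr h.1]
      simp [hmem]
    · rw [pvW_nil arr l r (by omega), pvW_nil arr (l + 1) r (by omega)]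
  · rfl
termination_by ((arr.length : Int) - l).toNat
decreasing_by omega

theorem pvSkipR_F (arr subset : List Int) (l r : Int) (hl : 0 ≤ l)
    (hr : r < (arr.length : Int)) :
    pvF arr subset l (pvSkipR arr subset r) = pvF arr subset l r := by
  unfold pvSkipR
  split
  · next h =>
    have hmem := h.2
    rw [PySem.List.pyGetD_eq_getElem arr 0 (by omega) hr] at hmem
    rw [pvSkipR_F arr subset l (r - 1) hl (by omega)]
    unfold pvF
    by_cases hlr : l ≤ r
    · rw [pvW_snoc arr l r hl hlr hr]
      simp [hmem]
    · rw [pvW_nil arr l r (by omega), pvW_nil arr l (r - 1) (by omega)]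
  · rfl
termination_by r.toNat
decreasing_by omega

theorem pvSkipL_stop (arr subset : List Int) (l : Int) :
    ¬ (pvSkipL arr subset l < (arr.length : Int) ∧
        PySem.List.pyGetD arr (pvSkipL arr subset l) 0 ∈ subset) := by
  unfold pvSkipL
  split
  · exact pvSkipL_stop arr subset (l + 1)
  · assumption
termination_by ((arr.length : Int) - l).toNat
decreasing_by omega

theorem pvSkipR_stop (arr subset : List Int) (r : Int) :
    ¬ (0 < pvSkipR arr subset r ∧
        PySem.List.pyGetD arr (pvSkipR arr subset r) 0 ∈ subset) := by
  unfold pvSkipR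
  split
  · exact pvSkipR_stop arr subset (r - 1)
  · assumption
termination_by r.toNat
decreasing_by omega

-- NE at step 0: the left-paired element occurs again strictly inside the window
theorem pvNE_head_mem (x y : Int) (mid : List Int) (s : Nat) (hs : 1 ≤ s)
    (h : pvNE (x :: (mid ++ [y])) s) : x ∈ mid := by
  have h0 := h 0 (by simp; omega) (by simp)
  have e1 : (x :: (mid ++ [y])).getD 0 0 = x := rfl
  have e2 : ((x :: (mid ++ [y])).drop 1) = mid ++ [y] := rfl
  have e3 : (x :: (mid ++ [y])).length - 2 * 0 - 2 = mid.length := by simp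
  rw [e1, e2, e3] at h0
  rwa [List.take_left] at h0

-- NE is preserved when the processed pair (first and last element) is removed
theorem pvNE_shift (x y : Int) (mid : List Int) (s : Nat)
    (h : pvNE (x :: (mid ++ [y])) (s + 1)) : pvNE mid s := by
  intro j hj hj2
  have hlen : (x :: (mid ++ [y])).length = mid.length + 2 := by simp
  have h1 := h (j + 1) (by rw [hlen]; simp at hj ⊢; omega) (by rw [hlen]; omega)
  have e1 : (x :: (mid ++ [y])).getD (j + 1) 0 = mid.getD j 0 := by
    rw [List.getD_cons_succ, List.getD_append _ _ _ _ (by omega)]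
  have e2 : (x :: (mid ++ [y])).drop (j + 1 + 1) = mid.drop (j + 1) ++ [y] := by
    rw [List.drop_succ_cons, List.drop_append_of_le_length (by omega)]
  rw [e1, e2, hlen] at h1
  have e3 : mid.length + 2 - 2 * (j + 1) - 2 = mid.length - 2 * j - 2 := by omega
  rw [e3, List.take_append_of_le_length (by simp; omega)] at h1
  exact h1

theorem pvCount3 (x y u : Int) (mid : List Int) :
    (((x :: (mid ++ [y])).count u : Nat) : Int)
      = (mid.count u : Int) + (if x = u then 1 else 0) + (if y = u then 1 else 0) := by
  simp only [List.count_cons, List.count_append, List.count_nil,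
    beq_iff_eq]
  push_cast
  split_ifs <;> omega

theorem pvFreqStep (freq : PySem.Dict Int Int) (a b v : Int) (mid : List Int)
    (ha : freq.getD a 0 = ((a :: (mid ++ [b])).count a : Int))
    (hb : freq.getD b 0 = ((a :: (mid ++ [b])).count b : Int))
    (hv : freq.getD v 0 = ((a :: (mid ++ [b])).count v : Int)) :
    ((freq.modify a 0 (· - 1)).modify b 0 (· - 1)).getD v 0 = (mid.count v : Int) := by
  rw [pvCount3] at ha hb hv
  rw [PySem.Dict.getD_modify, PySem.Dict.getD_modify, PySem.Dict.getD_modify, hb, ha, hv]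
  split_ifs <;> subst_vars <;> omega

-- the main loop invariant proof
theorem pvLoop_spec (arr : List Int) (limit : Int) (subset : List Int) :
    ∀ (n : Nat) (l r : Int) (freq : PySem.Dict Int Int) (changes : Int),
    (r - l + 1).toNat ≤ n → 0 ≤ l → r < (arr.length : Int) →
    (∀ v : Int, v ∉ subset → freq.getD v 0 = ((pvF arr subset l r).count v : Int)) →
    pvNE (pvF arr subset l r) (max (limit - changes + 1).toNat 1) →
    pvLoopA arr limit subset freq (PySem.Set.ofList subset) changes l r
      = some (min (changes + (((pvF arr subset l r).length + 1) / 2 : Nat)) limit) := by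
  intro n
  induction n with
  | zero =>
    intro l r freq changes hn hl hr hfreq hNE
    rw [pvLoopA, dif_neg (by omega : ¬ l ≤ r)]
    have hnil : pvF arr subset l r = [] := by
      unfold pvF; rw [pvW_nil arr l r (by omega)]; rfl
    rw [hnil]; norm_num
  | succ n ih =>
    intro l r freq changes hn hl hr hfreq hNE
    by_cases hlr : l ≤ r
    · rw [pvLoopA, dif_pos hlr]
      simp only []
      set l' := pvSkipL arr subset l with hl'def
      set r' := pvSkipR arr subset r with hr'def
      have hll' : l ≤ l' := pvSkipL_ge arr subset l
      have hrr' : r' ≤ r := pvSkipR_le arr subset r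
      have hFeq : pvF arr subset l' r' = pvF arr subset l r := by
        have e2 : pvF arr subset l' r' = pvF arr subset l' r :=
          pvSkipR_F arr subset l' r (by omega) hr
        have e1 : pvF arr subset l' r = pvF arr subset l r :=
          pvSkipL_F arr subset l r hl
        exact e2.trans e1
      by_cases hp : l' ≤ r'
      · rw [dif_pos hp]
        have hl'len : l' < (arr.length : Int) := by omega
        have hal : PySem.List.pyGetD arr l' 0 ∉ subset := by
          have hs := pvSkipL_stop arr subset l
          rw [← hl'def] at hs
          intro hmem; exact hs ⟨hl'len, hmem⟩
        set al := PySem.List.pyGetD arr l' 0 with hal_def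
        set ar := PySem.List.pyGetD arr r' 0 with har_def
        by_cases hmid : l' < r'
        · -- a genuine pair: the window is al :: mid ++ [ar]
          have har : ar ∉ subset := by
            have hs := pvSkipR_stop arr subset r
            rw [← hr'def] at hs
            rw [har_def]
            intro hmem; exact hs ⟨by omega, hmem⟩
          have hsubs1 : (if ((freq.modify al 0 (· - 1)).modify ar 0 (· - 1)).getD ar 0 = 0 ∧
              PySem.Set.contains (PySem.Set.ofList subset) ar = true then
              PySem.Set.discard (PySem.Set.ofList subset) ar else PySem.Set.ofList subset)
              = PySem.Set.ofList subset := by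
            rw [if_neg]
            rintro ⟨-, hc⟩
            exact har ((PySem.Set.mem_ofList _ _).mp ((PySem.Set.contains_iff _ _).mp hc))
          have hget_l : al = arr[l'.toNat]'(by omega) := by
            rw [hal_def, PySem.List.pyGetD_eq_getElem arr 0 (by omega) hl'len]
          have hget_r : ar = arr[r'.toNat]'(by omega) := by
            rw [har_def, PySem.List.pyGetD_eq_getElem arr 0 (by omega) (by omega)]
          have hdecomp : pvF arr subset l' r'
              = al :: (pvF arr subset (l' + 1) (r' - 1) ++ [ar]) := by
            unfold pvF
            rw [pvW_cons arr l' r' (by omega) hp hl'len,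
                pvW_snoc arr (l' + 1) r' (by omega) (by omega) (by omega)]
            rw [List.filter_cons, List.filter_append]
            simp only [← hget_l, ← hget_r]
            simp [hal, har]
          set mid := pvF arr subset (l' + 1) (r' - 1) with hmid_def
          have hFlr : pvF arr subset l r = al :: (mid ++ [ar]) := by
            rw [← hFeq, hdecomp]
          -- counts of any non-subset value in the new window
          have hcount : ∀ v : Int, v ∉ subset →
              ((freq.modify al 0 (· - 1)).modify ar 0 (· - 1)).getD v 0
                = (mid.count v : Int) := by
            intro v hv
            refine pvFreqStep freq al ar v mid ?_ ?_ ?_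
            · have h := hfreq al hal; rwa [hFlr] at h
            · have h := hfreq ar har; rwa [hFlr] at h
            · have h := hfreq v hv; rwa [hFlr] at h
          -- NE at step 0: al occurs strictly inside, so freq[al] ≠ 0 (no KeyError)
          have hsge : 1 ≤ max (limit - changes + 1).toNat 1 := by omega
          have hNE' : pvNE (al :: (mid ++ [ar])) (max (limit - changes + 1).toNat 1) := by
            rwa [hFlr] at hNE
          have hmem_mid : al ∈ mid := pvNE_head_mem al ar mid _ hsge hNE'
          have hne0 : ¬ (((freq.modify al 0 (· - 1)).modify ar 0 (· - 1)).getD al 0 = 0) := by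
            rw [hcount al hal]
            have := List.count_pos_iff.mpr hmem_mid
            omega
          rw [if_neg hne0]
          simp only [hsubs1]
          rw [hFlr]
          have hlenF : (al :: (mid ++ [ar])).length = mid.length + 2 := by simp
          by_cases hlim : changes + 1 > limit
          · rw [if_pos hlim, hlenF]
            have : 1 ≤ (mid.length + 2 + 1) / 2 := by omega
            simp only [Option.some.injEq]
            omega
          · rw [if_neg hlim]
            have hstep : max (limit - changes + 1).toNat 1
                = max (limit - (changes + 1) + 1).toNat 1 + 1 := by omega
            have hNE2 : pvNE mid (max (limit - (changes + 1) + 1).toNat 1) := by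
              apply pvNE_shift al ar
              rwa [hstep] at hNE'
            rw [ih (l' + 1) (r' - 1) _ (changes + 1) (by omega) (by omega) (by omega)
                  hcount hNE2]
            simp only [Option.some.injEq, ← hmid_def, hlenF]
            omega
        · -- the lone middle element: the window is [al]
          have heq : l' = r' := by omega
          have hget_l : al = arr[l'.toNat]'(by omega) := by
            rw [hal_def, PySem.List.pyGetD_eq_getElem arr 0 (by omega) hl'len]
          have har_al : ar = al := by rw [har_def, hal_def, ← heq]
          have har : ar ∉ subset := har_al ▸ hal
          have hsubs1 : (if ((freq.modify al 0 (· - 1)).modify ar 0 (· - 1)).getD ar 0 = 0 ∧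
              PySem.Set.contains (PySem.Set.ofList subset) ar = true then
              PySem.Set.discard (PySem.Set.ofList subset) ar else PySem.Set.ofList subset)
              = PySem.Set.ofList subset := by
            rw [if_neg]
            rintro ⟨-, hc⟩
            exact har ((PySem.Set.mem_ofList _ _).mp ((PySem.Set.contains_iff _ _).mp hc))
          have hFsing : pvF arr subset l r = [al] := by
            rw [← hFeq, ← heq]
            unfold pvF
            rw [pvW_cons arr l' l' (by omega) le_rfl hl'len, pvW_nil arr (l' + 1) l' (by omega)]
            simp [← hget_l, hal]
          have hne0 : ¬ (((freq.modify al 0 (· - 1)).modify ar 0 (· - 1)).getD al 0 = 0) := by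
            rw [har_al, PySem.Dict.getD_modify, PySem.Dict.getD_modify]
            have hfal := hfreq al hal
            rw [hFsing] at hfal
            simp at hfal
            split_ifs <;> omega
          rw [if_neg hne0]
          simp only [hsubs1]
          rw [hFsing]
          by_cases hlim : changes + 1 > limit
          · rw [if_pos hlim]; norm_num
          · rw [if_neg hlim]
            rw [pvLoopA, dif_neg (by omega : ¬ l' + 1 ≤ r' - 1)]
            norm_num
      · -- skips crossed: non-subset window is empty, loop exits
        rw [dif_neg hp]
        have hnil : pvF arr subset l r = [] := by
          rw [← hFeq]; unfold pvF; rw [pvW_nil arr l' r' (by omega)]; rfl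
        rw [hnil]; norm_num
    · rw [pvLoopA, dif_neg hlr]
      have hnil : pvF arr subset l r = [] := by
        unfold pvF; rw [pvW_nil arr l r (by omega)]; rfl
      rw [hnil]; norm_num

-- ===== VERDICT (by name: the statement is the Claim_ definition above) =====
theorem smallest_change_in_subset_spec : Claim_equal_smallest_change_in_subset := by
  intro arr limit subset _ hpre
  unfold Spec_smallest_change_in_subset smallest_change_in_subset smallest_change_in_subset_alt
  have hF : pvF arr subset 0 ((arr.length : Int) - 1)
      = arr.filter (fun x => decide (x ∉ subset)) := by
    unfold pvF pvW
    simp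
  rw [pvLoop_spec arr limit subset arr.length 0 ((arr.length : Int) - 1)
        (PySem.Dict.counter arr) 0 (by omega) (by omega) (by omega)
        (by
          intro v hv
          rw [PySem.Dict.getD_counter, hF, List.count_filter (by simpa using hv)])
        (by
          rw [hF]
          have h2 : max (limit - 0 + 1).toNat 1 = limit.toNat + 1 := by omega
          rw [h2]
          exact hpre)]
  rw [hF]
  simp only [Option.getD_some]
  rw [PySem.List.foldl_ite_add_one (fun x => x ∉ subset) arr 0]
  rw [PySem.Int.floordiv_eq_ediv_of_pos (by omega)]
  have hc : (arr.filter (fun x => decide (x ∉ subset))).length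
      = arr.countP fun x => decide (x ∉ subset) := Eq.symm (List.countP_eq_length_filter ..)
  rw [hc]
  set c : Nat := arr.countP fun x => decide (x ∉ subset)
  have : ((( c + 1) / 2 : Nat) : Int) = (0 + (c : Int) + 1) / 2 := by omega
  omega
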